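-- pv_equiv track=rewrite | github.com/mssdfg0708/Algorithm | Programmers/양궁대회.py | solution
-- ===== SOURCE A (Python) =====
-- from itertools import product
--
-- def solution(arrow, info):
--     info.reverse()
--     appeach_sum = 0
--     for score in range(len(info)):
--         if info[score] > 0:
--             appeach_sum += score
--
--     arrow2score = []
--     for index in range(len(info)):
--         arrow2score.append(info[index]+1)
--
--     candidates = []
--     max_difference = -1 * appeach_sum
--     candidates_booleans = list(product([True, False], repeat=11))
--     for boolean in candidates_booleans:
--         arrow_cost = 0
--         candidate_sum = 0
--         candidate = []
--
--         # BitMask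
--         for score in range(len(boolean)):
--             if boolean[score]:
--                 arrow_cost += arrow2score[score]
--                 candidate_sum += score
--                 candidate.append(arrow2score[score])
--             else:
--                 candidate.append(0)
--
--         # 화살 개수가 유효한지 확인
--         if arrow_cost > arrow:
--             continue
--
--         # 남은 화살 0점에 모두 소진
--         if arrow - arrow_cost > 0:
--             candidate[0] += arrow - arrow_cost
--
--         # 점수 차이가 최고 인지 확인
--         score_difference = -1 * appeach_sum
--         for score in range(len(boolean)):
--             if candidate[score]:
--                 score_difference += score
--                 if info[score]:
--                     score_difference += score
--
--         if score_difference > max_difference: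
--             candidates.clear()
--             candidates.append(candidate)
--             max_difference = score_difference
--             continue
--         if score_difference == max_difference:
--             candidates.append(candidate)
--             continue
--
--     # candidates 정렬
--     candidates.sort(key=lambda x: (x[0] * -1, x[1] * -1, x[2] * -1, x[3] * -1, x[4] * -1,
--                                    x[5] * -1, x[6] * -1, x[7] * -1, x[8] * -1, x[9] * -1, x[10] * -1))
--     for index in range(len(candidates)):
--         candidates[index].reverse()
--
--     # 점수 차이가 양수인지 확인
--     if max_difference <= 0:
--         return [-1]
--
--     return candidates[0]
-- ===== SOURCE B (Python) =====
-- def solution(arrow, info):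
--     info.reverse()
--     appeach_sum = 0
--     for score in range(len(info)):
--         if info[score] > 0:
--             appeach_sum += score
--
--     best = None  # (difference, allocation) with the allocation score-0-first
--
--     def dfs(score, remaining, cand):
--         nonlocal best
--         if score < 11:
--             cost = info[score] + 1
--             dfs(score + 1, remaining - cost, cand + [cost])  # beat ring `score`
--             dfs(score + 1, remaining, cand + [0])            # skip ring `score`
--             return
--         if remaining < 0:
--             return
--         cand = cand.copy()
--         cand[0] += remaining  # pour the leftover arrows into ring 0
--         d = -appeach_sum
--         for s in range(11):
--             if cand[s]:
--                 d += s
--                 if info[s]: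
--                     d += s
--         if best is None or d > best[0] or (d == best[0] and best[1] < cand):
--             best = (d, cand)
--
--     dfs(0, arrow, [])
--     if best is None or best[0] <= 0:
--         return [-1]
--     return list(reversed(best[1]))
-- ===== Notes on version B (the rewrite author's own statement) =====
-- stated objective: alternative
-- what changed: Replaces A's itertools.product list of 2048 boolean tuples, a candidates list of all best allocations and a final 11-key sort by a recursive take/skip DFS over the 11 rings that threads one running best (difference, allocation) with an explicit lexicographic tie-break, then reverses that single winner.
import Mathlib
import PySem

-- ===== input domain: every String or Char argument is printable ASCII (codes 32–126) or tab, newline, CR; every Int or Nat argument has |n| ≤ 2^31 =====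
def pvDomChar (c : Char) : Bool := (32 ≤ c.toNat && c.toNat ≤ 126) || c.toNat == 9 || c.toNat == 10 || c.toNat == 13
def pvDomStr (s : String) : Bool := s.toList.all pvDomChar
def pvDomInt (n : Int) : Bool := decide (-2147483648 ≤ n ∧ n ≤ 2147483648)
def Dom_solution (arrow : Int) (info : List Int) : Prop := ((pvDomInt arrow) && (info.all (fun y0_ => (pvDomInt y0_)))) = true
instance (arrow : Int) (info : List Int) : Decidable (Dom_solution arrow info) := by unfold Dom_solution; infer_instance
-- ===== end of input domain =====

-- B replaces A's product-of-2048-tuples loop + candidates list + 11-key sort by a recursive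
-- take/skip DFS over the 11 rings that threads a single running best (difference, allocation);
-- same return value, and both A and B reverse `info` in place (the caller observes that mutation).

-- ===== PORT A =====
-- itertools.product([True, False], repeat=n), in CPython's order (first factor varies slowest)
def prodTF : Nat → List (List Bool)
  | 0 => [[]]
  | n + 1 => ((prodTF n).map (fun t => true :: t)) ++ ((prodTF n).map (fun t => false :: t))

def solution (arrow : Int) (info : List Int) : List Int :=
  let info := info.reverse
  let appeach_sum : Int := (PySem.List.pyRange 0 (PySem.List.len info)).foldl
    (fun acc score => if PySem.List.pyGetD info score 0 > 0 then acc + score else acc) 0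
  let arrow2score : List Int := (PySem.List.pyRange 0 (PySem.List.len info)).foldl
    (fun acc index => acc ++ [PySem.List.pyGetD info index 0 + 1]) []
  let st := (prodTF 11).foldl (fun st boolean =>
    -- BitMask loop: (arrow_cost, candidate_sum, candidate)
    let inner := (PySem.List.pyRange 0 (PySem.List.len boolean)).foldl
      (fun (acc : Int × Int × List Int) score =>
        if PySem.List.pyGetD boolean score false then
          (acc.1 + PySem.List.pyGetD arrow2score score 0, acc.2.1 + score,
            acc.2.2 ++ [PySem.List.pyGetD arrow2score score 0])
        else (acc.1, acc.2.1, acc.2.2 ++ [0])) (0, 0, [])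
    let arrow_cost := inner.1
    let candidate := inner.2.2
    if arrow_cost > arrow then st
    else
      let candidate := if arrow - arrow_cost > 0 then
          PySem.List.pySetD candidate 0 (PySem.List.pyGetD candidate 0 0 + (arrow - arrow_cost))
        else candidate
      let score_difference := (PySem.List.pyRange 0 (PySem.List.len boolean)).foldl
        (fun sd score =>
          if PySem.List.pyGetD candidate score 0 ≠ 0 then
            sd + score + (if PySem.List.pyGetD info score 0 ≠ 0 then score else 0)
          else sd) (-1 * appeach_sum)
      if score_difference > st.2 then ([candidate], score_difference)
      else if score_difference = st.2 then (st.1 ++ [candidate], st.2)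
      else st) (([] : List (List Int)), -1 * appeach_sum)
  -- sort key: Python's 11-tuple of negated entries, ported as an 11-element list
  -- (lists of equal length compare exactly like Python tuples: lexicographically)
  let candidates := PySem.List.sorted st.1 (fun x =>
    [PySem.List.pyGetD x 0 0 * -1, PySem.List.pyGetD x 1 0 * -1, PySem.List.pyGetD x 2 0 * -1,
     PySem.List.pyGetD x 3 0 * -1, PySem.List.pyGetD x 4 0 * -1, PySem.List.pyGetD x 5 0 * -1,
     PySem.List.pyGetD x 6 0 * -1, PySem.List.pyGetD x 7 0 * -1, PySem.List.pyGetD x 8 0 * -1,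
     PySem.List.pyGetD x 9 0 * -1, PySem.List.pyGetD x 10 0 * -1])
  let candidates := candidates.map (fun c => c.reverse)
  if st.2 ≤ 0 then [-1]
  -- candidates[0]; under Pre_ this branch is only reached with a non-empty list (proved below)
  else PySem.List.pyGetD candidates 0 []

-- ===== PORT B =====
-- B's leaf loop computing the score difference of a finished allocation
def altDiff (info : List Int) (appeach_sum : Int) (cand : List Int) : Int :=
  (PySem.List.pyRange 0 11).foldl
    (fun d s =>
      if PySem.List.pyGetD cand s 0 ≠ 0 then
        d + s + (if PySem.List.pyGetD info s 0 ≠ 0 then s else 0)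
      else d) (-appeach_sum)

-- B's DFS: take ring `score` (spend info[score]+1 arrows) or skip it; leaf pours the
-- leftover into ring 0 and updates the single running best
def dfsB (info : List Int) (appeach_sum : Int) :
    Nat → Int → List Int → Option (Int × List Int) → Option (Int × List Int)
  | score, remaining, cand, best =>
    if h : score < 11 then
      let cost := PySem.List.pyGetD info (score : Int) 0 + 1
      let best := dfsB info appeach_sum (score + 1) (remaining - cost) (cand ++ [cost]) best
      dfsB info appeach_sum (score + 1) remaining (cand ++ [0]) best
    else
      if remaining < 0 then best
      else
        let cand := PySem.List.pySetD cand 0 (PySem.List.pyGetD cand 0 0 + remaining)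
        let d := altDiff info appeach_sum cand
        match best with
        | none => some (d, cand)
        | some (db, cb) => if d > db ∨ (d = db ∧ cb < cand) then some (d, cand) else best
  termination_by score _ _ _ => 11 - score

def solution_alt (arrow : Int) (info : List Int) : List Int :=
  let info := info.reverse
  let appeach_sum : Int := (PySem.List.pyRange 0 (PySem.List.len info)).foldl
    (fun acc score => if PySem.List.pyGetD info score 0 > 0 then acc + score else acc) 0
  match dfsB info appeach_sum 0 arrow [] none with
  | none => [-1]
  | some (d, c) => if d ≤ 0 then [-1] else c.reverse

-- ===== PRECONDITION & SPEC =====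
-- Pre_ excludes only the inputs where A raises: with fewer than 11 entries Python's
-- arrow2score[score] / info[score] accesses at scores 0..10 raise IndexError (B raises there too).
def Pre_solution (arrow : Int) (info : List Int) : Prop := 11 ≤ info.length
instance (arrow : Int) (info : List Int) : Decidable (Pre_solution arrow info) := by unfold Pre_solution; infer_instance

def pvWitness_solution : Int × List Int := (5, [0, 1, 0, 2, 0, 0, 0, 0, 0, 1, 1])

def Spec_solution (arrow : Int) (info : List Int) (out : List Int) : Prop := out = solution_alt arrow info
instance (arrow : Int) (info : List Int) (out : List Int) : Decidable (Spec_solution arrow info out) := by unfold Spec_solution; infer_instance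

-- ===== CLAIM (what is proved, stated in full; the proofs are below) =====
def Claim_equal_solution : Prop := ∀ (arrow : Int) (info : List Int), Dom_solution arrow info → Pre_solution arrow info → Spec_solution arrow info (solution arrow info)


-- ===== LEMMAS AND PROOFS =====

-- proof-side abbreviation for A's sort key
def keyA (x : List Int) : List Int :=
  [PySem.List.pyGetD x 0 0 * -1, PySem.List.pyGetD x 1 0 * -1, PySem.List.pyGetD x 2 0 * -1,
   PySem.List.pyGetD x 3 0 * -1, PySem.List.pyGetD x 4 0 * -1, PySem.List.pyGetD x 5 0 * -1,
   PySem.List.pyGetD x 6 0 * -1, PySem.List.pyGetD x 7 0 * -1, PySem.List.pyGetD x 8 0 * -1,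
   PySem.List.pyGetD x 9 0 * -1, PySem.List.pyGetD x 10 0 * -1]

-- cost and (suffix of the) allocation of a selection vector starting at ring s0
def buildCC (info : List Int) : Nat → List Bool → Int × List Int
  | _, [] => (0, [])
  | s0, b :: bs =>
    let cost := PySem.List.pyGetD info (s0 : Int) 0 + 1
    let r := buildCC info (s0 + 1) bs
    if b then (cost + r.1, cost :: r.2) else (r.1, 0 :: r.2)

-- the sum-of-selected-scores component of A's inner loop (dead in A, tracked for the induction)
def sumSel : Nat → List Bool → Int
  | _, [] => 0
  | s0, b :: bs => (if b then (s0 : Int) else 0) + sumSel (s0 + 1) bs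

def pourC (c : List Int) (r : Int) : List Int :=
  PySem.List.pySetD c 0 (PySem.List.pyGetD c 0 0 + r)

-- the sequence of poured leaf allocations visited by B's DFS
def leavesB (info : List Int) : Nat → Int → List Int → List (List Int)
  | score, remaining, cand =>
    if _h : score < 11 then
      leavesB info (score + 1) (remaining - (PySem.List.pyGetD info (score : Int) 0 + 1))
          (cand ++ [PySem.List.pyGetD info (score : Int) 0 + 1])
        ++ leavesB info (score + 1) remaining (cand ++ [0])
    else if remaining < 0 then [] else [pourC cand remaining]
  termination_by score _ _ => 11 - score

def updB (info : List Int) (ap : Int) (best : Option (Int × List Int)) (c : List Int) :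
    Option (Int × List Int) :=
  let d := altDiff info ap c
  match best with
  | none => some (d, c)
  | some (db, cb) => if d > db ∨ (d = db ∧ cb < c) then some (d, c) else best

def stepA (info : List Int) (ap : Int) (st : List (List Int) × Int) (c : List Int) :
    List (List Int) × Int :=
  let d := altDiff info ap c
  if d > st.2 then ([c], d)
  else if d = st.2 then (st.1 ++ [c], st.2)
  else st

-- the valid (cost within budget) poured allocations, in A's enumeration order
def validL (info : List Int) (arrow : Int) : List (List Int) :=
  (prodTF 11).filterMap (fun bs =>
    let r := buildCC info 0 bs
    if r.1 ≤ arrow then some (pourC r.2 (arrow - r.1)) else none)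

-- invariant relating A's (candidates, max_difference) to B's running best
def RelAB (ap : Int) : List (List Int) × Int → Option (Int × List Int) → Prop
  | (cands, maxd), none => cands = [] ∧ maxd = -ap
  | (cands, maxd), some (db, cb) =>
      maxd = db ∧ cb ∈ cands ∧ (∀ x ∈ cands, x ≤ cb) ∧ (∀ x ∈ cands, x.length = 11)

lemma length_mem_prodTF {n : Nat} {bs : List Bool} (h : bs ∈ prodTF n) : bs.length = n := by
  induction n generalizing bs with
  | zero => simp [prodTF] at h; simp [h]
  | succ n ih =>
    simp [prodTF] at h
    rcases h with ⟨t, ht, rfl⟩ | ⟨t, ht, rfl⟩ <;> simp [ih ht]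

lemma length_buildCC (info : List Int) (s0 : Nat) (bs : List Bool) :
    (buildCC info s0 bs).2.length = bs.length := by
  induction bs generalizing s0 with
  | nil => simp [buildCC]
  | cons b t ih =>
    simp only [buildCC]
    split <;> simp [ih]

lemma length_pourC (c : List Int) (r : Int) : (pourC c r).length = c.length := by
  simp [pourC, PySem.List.length_pySetD]

lemma pourC_zero (c : List Int) (h : c ≠ []) : pourC c 0 = c := by
  obtain ⟨x, t, rfl⟩ := List.exists_cons_of_ne_nil h
  simp [pourC, PySem.List.pyGetD_zero_cons, PySem.List.pySetD, PySem.List.pySet?,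
    PySem.List.pyIdx?]

lemma foldl_ge {α : Type} (f : Int → α → Int) (l : List α) (init : Int)
    (h : ∀ acc, ∀ x ∈ l, acc ≤ f acc x) : init ≤ l.foldl f init := by
  induction l generalizing init with
  | nil => simp
  | cons x xs ih =>
    simp only [List.foldl_cons]
    exact le_trans (h init x (by simp)) (ih _ (fun acc y hy => h acc y (by simp [hy])))

lemma appeach_nonneg (info : List Int) :
    0 ≤ (PySem.List.pyRange 0 (PySem.List.len info)).foldl
      (fun acc score => if PySem.List.pyGetD info score 0 > 0 then acc + score else acc) 0 := by
  apply foldl_ge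
  intro acc x hx
  have := (PySem.List.mem_pyRange_one.mp hx).1
  split <;> omega

lemma altDiff_ge (info : List Int) (ap : Int) (c : List Int) : -ap ≤ altDiff info ap c := by
  apply foldl_ge
  intro acc x hx
  have := (PySem.List.mem_pyRange_one.mp hx).1
  split <;> [skip; omega]
  split <;> omega

lemma arrow2score_eq (info : List Int) :
    (PySem.List.pyRange 0 (PySem.List.len info)).foldl
      (fun acc index => acc ++ [PySem.List.pyGetD info index 0 + 1]) []
    = info.map (· + 1) := by
  rw [PySem.List.foldl_append_singleton_eq_map]
  conv_rhs => rw [← PySem.List.map_pyGetD_pyRange_zero info 0, List.map_map]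
  rfl

lemma getD_append_length {α : Type} (pre : List α) (b : α) (t : List α) (d : α) :
    (pre ++ b :: t).getD pre.length d = b := by
  simp [List.getD_eq_getElem?_getD]

-- A's inner (BitMask) loop computes buildCC / sumSel
lemma innerA_eq (info a2s : List Int) (boolean : List Bool) (ha2s : a2s = info.map (· + 1)) :
    ∀ (bs pre : List Bool), boolean = pre ++ bs → pre.length + bs.length ≤ info.length →
    ∀ (acc : Int × Int × List Int),
    (PySem.List.pyRange (pre.length : Int) ((pre.length : Int) + (bs.length : Int))).foldl
      (fun (acc : Int × Int × List Int) score =>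
        if PySem.List.pyGetD boolean score false then
          (acc.1 + PySem.List.pyGetD a2s score 0, acc.2.1 + score,
            acc.2.2 ++ [PySem.List.pyGetD a2s score 0])
        else (acc.1, acc.2.1, acc.2.2 ++ [0])) acc
    = (acc.1 + (buildCC info pre.length bs).1, acc.2.1 + sumSel pre.length bs,
        acc.2.2 ++ (buildCC info pre.length bs).2) := by
  intro bs
  induction bs with
  | nil =>
    intro pre hb hlen acc
    have : PySem.List.pyRange (pre.length : Int) ((pre.length : Int) + (([] : List Bool).length : Int)) = [] := by
      apply List.eq_nil_iff_forall_not_mem.mpr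
      intro x hx
      have := PySem.List.mem_pyRange_one.mp hx
      simp at this
      omega
    rw [this]
    simp [buildCC, sumSel]
  | cons b t ih =>
    intro pre hb hlen acc
    have hlt : (pre.length : Int) < (pre.length : Int) + ((b :: t).length : Int) := by
      simp only [List.length_cons]; push_cast; omega
    rw [PySem.List.pyRange_one_cons hlt, List.foldl_cons]
    have hget : PySem.List.pyGetD boolean (pre.length : Int) false = b := by
      rw [hb, PySem.List.pyGetD_natCast, getD_append_length]
    have hprelt : pre.length < info.length := by simp only [List.length_cons] at hlen; omega
    have ha2sget : PySem.List.pyGetD a2s (pre.length : Int) 0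
        = PySem.List.pyGetD info (pre.length : Int) 0 + 1 := by
      rw [ha2s, PySem.List.pyGetD_natCast, PySem.List.pyGetD_natCast]
      rw [List.getD_eq_getElem _ _ (by simpa using hprelt), List.getD_eq_getElem _ _ hprelt]
      simp
    have hrange : PySem.List.pyRange ((pre.length : Int) + 1) ((pre.length : Int) + ((b :: t).length : Int))
        = PySem.List.pyRange (((pre ++ [b]).length : Int)) ((((pre ++ [b]).length : Int)) + (t.length : Int)) := by
      have h1 : ((pre ++ [b]).length : Int) = (pre.length : Int) + 1 := by
        push_cast [List.length_append, List.length_singleton]; ring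
      rw [h1]
      congr 1
      push_cast [List.length_cons]
      ring
    rw [hget, hrange]
    cases b with
    | true =>
      rw [if_pos rfl]
      have hb' : boolean = (pre ++ [true]) ++ t := by simp [hb]
      have hlen' : (pre ++ [true]).length + t.length ≤ info.length := by
        simp at hlen ⊢; omega
      rw [ih (pre ++ [true]) hb' hlen']
      simp only [buildCC, sumSel, reduceIte, List.length_append, List.length_singleton]
      rw [ha2sget]
      refine congrArg₂ Prod.mk (by ring) (congrArg₂ Prod.mk (by ring) ?_)
      rw [List.append_assoc, List.singleton_append]
    | false =>
      rw [if_neg (by simp)]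
      have hb' : boolean = (pre ++ [false]) ++ t := by simp [hb]
      have hlen' : (pre ++ [false]).length + t.length ≤ info.length := by
        simp at hlen ⊢; omega
      rw [ih (pre ++ [false]) hb' hlen']
      simp only [buildCC, sumSel, Bool.false_eq_true, if_false, List.length_append,
        List.length_singleton]
      refine congrArg₂ Prod.mk rfl (congrArg₂ Prod.mk (by ring) ?_)
      rw [List.append_assoc, List.singleton_append]

-- B's DFS is the fold of the best-update over its leaf sequence
lemma dfsB_eq_foldl (info : List Int) (ap : Int) :
    ∀ (k score : Nat), 11 - score = k → ∀ (rem : Int) (cand : List Int) (best : Option (Int × List Int)),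
    dfsB info ap score rem cand best = (leavesB info score rem cand).foldl (updB info ap) best := by
  intro k
  induction k with
  | zero =>
    intro score hk rem cand best
    have hs : ¬ score < 11 := by omega
    rw [dfsB, leavesB]
    rw [dif_neg hs, dif_neg hs]
    by_cases hr : rem < 0
    · rw [if_pos hr, if_pos hr]; rfl
    · rw [if_neg hr, if_neg hr]
      simp only [List.foldl_cons, List.foldl_nil, updB, pourC]
  | succ k ih =>
    intro score hk rem cand best
    have hs : score < 11 := by omega
    rw [dfsB, leavesB]
    rw [dif_pos hs, dif_pos hs]
    rw [List.foldl_append]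
    rw [ih (score + 1) (by omega), ih (score + 1) (by omega)]

-- the DFS leaf sequence is A's filterMap over the product of booleans
lemma leavesB_eq (info : List Int) :
    ∀ (k s0 : Nat), s0 + k = 11 → ∀ (rem : Int) (cand : List Int),
    leavesB info s0 rem cand = (prodTF k).filterMap (fun bs =>
      let r := buildCC info s0 bs
      if r.1 ≤ rem then some (pourC (cand ++ r.2) (rem - r.1)) else none) := by
  intro k
  induction k with
  | zero =>
    intro s0 hs rem cand
    rw [leavesB, dif_neg (by omega : ¬ s0 < 11)]
    by_cases hr : rem < 0
    · rw [if_pos hr]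
      simp [prodTF, buildCC, show ¬ ((0:Int) ≤ rem) by omega]
    · rw [if_neg hr]
      simp [prodTF, buildCC, show (0:Int) ≤ rem by omega]
  | succ k ih =>
    intro s0 hs rem cand
    rw [leavesB, dif_pos (by omega : s0 < 11)]
    rw [ih (s0 + 1) (by omega), ih (s0 + 1) (by omega)]
    rw [show prodTF (k+1) = ((prodTF k).map (fun t => true :: t)) ++ ((prodTF k).map (fun t => false :: t)) from rfl]
    rw [List.filterMap_append, List.filterMap_map, List.filterMap_map]
    congr 1
    · apply List.filterMap_congr
      intro bs _
      simp only [Function.comp_apply, buildCC, reduceIte]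
      by_cases hc : (buildCC info (s0 + 1) bs).1 ≤ rem - (PySem.List.pyGetD info (s0 : Int) 0 + 1)
      · rw [if_pos hc, if_pos (by omega)]
        rw [List.append_assoc, List.singleton_append, sub_sub]
      · rw [if_neg hc, if_neg (by omega)]
    · apply List.filterMap_congr
      intro bs _
      simp only [Function.comp_apply, buildCC, Bool.false_eq_true, if_false]
      by_cases hc : (buildCC info (s0 + 1) bs).1 ≤ rem
      · rw [if_pos hc, if_pos hc, List.append_assoc, List.singleton_append]
      · rw [if_neg hc, if_neg hc]

lemma validL_prop (info : List Int) (arrow ap : Int) :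
    ∀ c ∈ validL info arrow, c.length = 11 ∧ -ap ≤ altDiff info ap c := by
  intro c hc
  refine ⟨?_, altDiff_ge info ap c⟩
  obtain ⟨bs, hbs, hsome⟩ := List.mem_filterMap.mp hc
  simp only at hsome
  split at hsome
  · cases hsome
    rw [length_pourC, length_buildCC, length_mem_prodTF hbs]
  · cases hsome

-- the joint fold invariant
lemma fold_invariant (info : List Int) (ap : Int) :
    ∀ (L : List (List Int)), (∀ c ∈ L, c.length = 11 ∧ -ap ≤ altDiff info ap c) →
    ∀ (st : List (List Int) × Int) (best : Option (Int × List Int)), RelAB ap st best →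
    RelAB ap (L.foldl (stepA info ap) st) (L.foldl (updB info ap) best) := by
  intro L
  induction L with
  | nil => intro _ st best h; simpa using h
  | cons c L ih =>
    intro hL st best hrel
    simp only [List.foldl_cons]
    apply ih (fun x hx => hL x (by simp [hx]))
    obtain ⟨hc11, hcd⟩ := hL c (by simp)
    obtain ⟨cands, maxd⟩ := st
    cases best with
    | none =>
      obtain ⟨rfl, rfl⟩ := hrel
      simp only [stepA, updB]
      rcases lt_or_eq_of_le hcd with h | h
      · rw [if_pos h]
        exact ⟨rfl, by simp, by simp, by simp [hc11]⟩
      · rw [if_neg (by omega), if_pos h.symm]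
        exact ⟨h, by simp, by simp, by simp [hc11]⟩
    | some b =>
      obtain ⟨db, cb⟩ := b
      obtain ⟨rfl, hmem, hle, hlen⟩ := hrel
      simp only [stepA, updB]
      set d := altDiff info ap c with hd
      by_cases h1 : d > maxd
      · rw [if_pos h1, if_pos (Or.inl h1)]
        exact ⟨rfl, by simp, by simp, by simp [hc11]⟩
      · rw [if_neg h1]
        by_cases h2 : d = maxd
        · rw [if_pos h2]
          by_cases h3 : cb < c
          · rw [if_pos (Or.inr ⟨h2, h3⟩)]
            refine ⟨h2.symm, by simp, ?_, ?_⟩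
            · intro x hx
              rcases List.mem_append.mp hx with hx | hx
              · exact le_of_lt (lt_of_le_of_lt (hle x hx) h3)
              · simp at hx; simp [hx]
            · intro x hx
              rcases List.mem_append.mp hx with hx | hx
              · exact hlen x hx
              · simp at hx; simp [hx, hc11]
          · rw [if_neg (by rintro (h | ⟨_, h⟩) <;> [omega; exact h3 h])]
            refine ⟨rfl, by simp [hmem], ?_, ?_⟩
            · intro x hx
              rcases List.mem_append.mp hx with hx | hx
              · exact hle x hx
              · simp at hx; simp [hx]; exact le_of_not_gt h3
            · intro x hx
              rcases List.mem_append.mp hx with hx | hx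
              · exact hlen x hx
              · simp at hx; simp [hx, hc11]
        · rw [if_neg h2, if_neg (by rintro (h | ⟨h, _⟩) <;> omega)]
          exact ⟨rfl, hmem, hle, hlen⟩

lemma keyA_eq (x : List Int) (h : x.length = 11) : keyA x = x.map Neg.neg := by
  match x, h with
  | [a0,a1,a2,a3,a4,a5,a6,a7,a8,a9,a10], _ =>
    simp [keyA, PySem.List.pyGetD_ofNat']

lemma negmap_lt (x y : List Int) (h : x.length = y.length) :
    (x.map Neg.neg < y.map Neg.neg) ↔ y < x := by
  induction x generalizing y with
  | nil => cases y with
    | nil => simp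
    | cons b t => simp at h
  | cons a s ih =>
    cases y with
    | nil => simp at h
    | cons b t =>
      simp only [List.map_cons, List.cons_lt_cons_iff, ih t (by simpa using h)]
      constructor
      · rintro (h1 | ⟨h1, h2⟩)
        · exact Or.inl (by omega)
        · exact Or.inr ⟨by omega, h2⟩
      · rintro (h1 | ⟨h1, h2⟩)
        · exact Or.inl (by omega)
        · exact Or.inr ⟨by omega, h2⟩

-- head of A's sort is the lexicographically greatest candidate
lemma head_sorted (cands : List (List Int)) (cb : List Int) (h1 : cb ∈ cands)
    (h2 : ∀ x ∈ cands, x ≤ cb) (hlen : ∀ x ∈ cands, x.length = 11) :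
    ∃ t, PySem.List.sorted cands keyA = cb :: t := by
  have hne : cands ≠ [] := List.ne_nil_of_mem h1
  have hinst : PySem.List.sorted cands keyA false
      = @PySem.List.sorted _ _ LinearOrder.toPartialOrder.toLT LinearOrder.toDecidableLT cands keyA false := by
    congr
  rw [hinst]
  cases hs : @PySem.List.sorted _ _ LinearOrder.toPartialOrder.toLT LinearOrder.toDecidableLT cands keyA false with
  | nil =>
    exact absurd ((@PySem.List.sorted_eq_nil_iff _ _ LinearOrder.toPartialOrder.toLT
      LinearOrder.toDecidableLT cands keyA false).mp hs) hne
  | cons m t =>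
    refine ⟨t, ?_⟩
    have hm : m ∈ cands := (@PySem.List.sorted_perm _ _ LinearOrder.toPartialOrder.toLT
      LinearOrder.toDecidableLT cands keyA false).mem_iff.mp (by rw [hs]; simp)
    have hkey : keyA m ≤ keyA cb := PySem.List.key_head_sorted_le cands keyA hs cb h1
    have hmle : m ≤ cb := h2 m hm
    have hml : m.length = 11 := hlen m hm
    have hcbl : cb.length = 11 := hlen cb h1
    rcases eq_or_lt_of_le hmle with he | hlt
    · rw [he]
    · exfalso
      have hgt : keyA cb < keyA m := by
        rw [keyA_eq m hml, keyA_eq cb hcbl]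
        exact (negmap_lt cb m (by omega)).mpr hlt
      exact absurd hkey (not_le.mpr hgt)

-- named pieces of A's body (definitionally equal repackaging of the port, for the proof)
def apFold (info : List Int) : Int :=
  (PySem.List.pyRange 0 (PySem.List.len info)).foldl
    (fun acc score => if PySem.List.pyGetD info score 0 > 0 then acc + score else acc) 0

def a2sFold (info : List Int) : List Int :=
  (PySem.List.pyRange 0 (PySem.List.len info)).foldl
    (fun acc index => acc ++ [PySem.List.pyGetD info index 0 + 1]) []

def stepFull (arrow ap : Int) (info a2s : List Int) (st : List (List Int) × Int)
    (boolean : List Bool) : List (List Int) × Int :=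
  let inner := (PySem.List.pyRange 0 (PySem.List.len boolean)).foldl
    (fun (acc : Int × Int × List Int) score =>
      if PySem.List.pyGetD boolean score false then
        (acc.1 + PySem.List.pyGetD a2s score 0, acc.2.1 + score,
          acc.2.2 ++ [PySem.List.pyGetD a2s score 0])
      else (acc.1, acc.2.1, acc.2.2 ++ [0])) (0, 0, [])
  let arrow_cost := inner.1
  let candidate := inner.2.2
  if arrow_cost > arrow then st
  else
    let candidate := if arrow - arrow_cost > 0 then
        PySem.List.pySetD candidate 0 (PySem.List.pyGetD candidate 0 0 + (arrow - arrow_cost))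
      else candidate
    let score_difference := (PySem.List.pyRange 0 (PySem.List.len boolean)).foldl
      (fun sd score =>
        if PySem.List.pyGetD candidate score 0 ≠ 0 then
          sd + score + (if PySem.List.pyGetD info score 0 ≠ 0 then score else 0)
        else sd) (-1 * ap)
    if score_difference > st.2 then ([candidate], score_difference)
    else if score_difference = st.2 then (st.1 ++ [candidate], st.2)
    else st

lemma solutionA_unfold (arrow : Int) (info : List Int) :
    solution arrow info =
      (if ((prodTF 11).foldl
            (stepFull arrow (apFold info.reverse) info.reverse (a2sFold info.reverse))
            ([], -1 * apFold info.reverse)).2 ≤ 0 then [-1]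
       else PySem.List.pyGetD
         ((PySem.List.sorted ((prodTF 11).foldl
            (stepFull arrow (apFold info.reverse) info.reverse (a2sFold info.reverse))
            ([], -1 * apFold info.reverse)).1 keyA).map (fun c => c.reverse)) 0 []) := rfl

lemma solutionB_unfold (arrow : Int) (info : List Int) :
    solution_alt arrow info =
      (match dfsB info.reverse (apFold info.reverse) 0 arrow [] none with
       | none => [-1]
       | some (d, c) => if d ≤ 0 then [-1] else c.reverse) := rfl

lemma stepFull_eq (arrow ap : Int) (inf : List Int) (hlen : 11 ≤ inf.length) :
    ∀ (st : List (List Int) × Int), ∀ bs ∈ prodTF 11,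
    stepFull arrow ap inf (inf.map (· + 1)) st bs
    = (if (buildCC inf 0 bs).1 ≤ arrow then
         stepA inf ap st (pourC (buildCC inf 0 bs).2 (arrow - (buildCC inf 0 bs).1))
       else st) := by
  intro st bs hbs
  have hbl : bs.length = 11 := length_mem_prodTF hbs
  have hinner := innerA_eq inf (inf.map (· + 1)) bs rfl bs [] (by simp) (by simp [hbl]; omega) (0, 0, [])
  simp only [List.length_nil, Nat.cast_zero, zero_add, List.nil_append] at hinner
  rw [hbl, show ((11 : Nat) : Int) = (11 : Int) from by norm_num] at hinner
  simp only [stepFull, PySem.List.len_eq, hbl, Nat.cast_ofNat]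
  rw [hinner]
  have hlc : (buildCC inf 0 bs).2.length = 11 := by rw [length_buildCC, hbl]
  by_cases hc : (buildCC inf 0 bs).1 > arrow
  · rw [if_pos hc, if_neg (by omega : ¬ (buildCC inf 0 bs).1 ≤ arrow)]
  · rw [if_neg hc, if_pos (by omega : (buildCC inf 0 bs).1 ≤ arrow)]
    have hpour : (if arrow - (buildCC inf 0 bs).1 > 0 then
        PySem.List.pySetD (buildCC inf 0 bs).2 0
          (PySem.List.pyGetD (buildCC inf 0 bs).2 0 0 + (arrow - (buildCC inf 0 bs).1))
      else (buildCC inf 0 bs).2) = pourC (buildCC inf 0 bs).2 (arrow - (buildCC inf 0 bs).1) := by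
      by_cases hp : arrow - (buildCC inf 0 bs).1 > 0
      · rw [if_pos hp]; rfl
      · rw [if_neg hp]
        rw [show arrow - (buildCC inf 0 bs).1 = 0 from by omega]
        rw [pourC_zero _ (by intro h; rw [h] at hlc; simp at hlc)]
    rw [hpour, neg_one_mul]
    rfl

-- ===== VERDICT (by name: the statement is the Claim_ definition above) =====
theorem solution_spec : Claim_equal_solution := by
  intro arrow info _ hpre
  show solution arrow info = solution_alt arrow info
  rw [solutionA_unfold, solutionB_unfold]
  have hlen : 11 ≤ info.reverse.length := by
    rw [List.length_reverse]; exact hpre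
  have hap0 : 0 ≤ apFold info.reverse := appeach_nonneg info.reverse
  have ha2s : a2sFold info.reverse = info.reverse.map (· + 1) := arrow2score_eq info.reverse
  rw [ha2s]
  have hfoldA : (prodTF 11).foldl
      (stepFull arrow (apFold info.reverse) info.reverse (info.reverse.map (· + 1)))
      ([], -1 * apFold info.reverse)
      = (validL info.reverse arrow).foldl (stepA info.reverse (apFold info.reverse))
        ([], -(apFold info.reverse)) := by
    rw [neg_one_mul, validL, List.foldl_filterMap]
    apply PySem.List.foldl_congr_mem
    intro st bs hbs
    rw [stepFull_eq arrow (apFold info.reverse) info.reverse hlen st bs hbs]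
    by_cases h : (buildCC info.reverse 0 bs).1 ≤ arrow
    · simp [h]
    · simp [h]
  rw [hfoldA]
  rw [dfsB_eq_foldl info.reverse (apFold info.reverse) 11 0 rfl arrow [] none]
  rw [leavesB_eq info.reverse 11 0 rfl arrow []]
  simp only [List.nil_append]
  rw [show ((prodTF 11).filterMap (fun bs =>
      let r := buildCC info.reverse 0 bs
      if r.1 ≤ arrow then some (pourC r.2 (arrow - r.1)) else none))
    = validL info.reverse arrow from rfl]
  have hrel := fold_invariant info.reverse (apFold info.reverse) (validL info.reverse arrow)
    (validL_prop info.reverse arrow (apFold info.reverse)) ([], -(apFold info.reverse)) none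
    ⟨rfl, rfl⟩
  cases hbf : (validL info.reverse arrow).foldl (updB info.reverse (apFold info.reverse)) none with
  | none =>
    rw [hbf] at hrel
    obtain ⟨h1, h2⟩ := hrel
    rw [h2, if_pos (by omega)]
  | some b =>
    obtain ⟨db, cb⟩ := b
    rw [hbf] at hrel
    obtain ⟨hmaxd, hmem, hle, hlen11⟩ := hrel
    rw [hmaxd]
    have hiota : (match some (db, cb) with
        | none => ([-1] : List Int)
        | some (d, c) => if d ≤ 0 then [-1] else c.reverse)
      = if db ≤ 0 then [-1] else cb.reverse := rfl
    rw [hiota]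
    by_cases hdb : db ≤ 0
    · rw [if_pos hdb, if_pos hdb]
    · rw [if_neg hdb, if_neg hdb]
      obtain ⟨t, hsort⟩ := head_sorted _ cb hmem hle hlen11
      rw [hsort, List.map_cons, PySem.List.pyGetD_zero_cons]
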